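-- pv_equiv track=rewrite | github.com/mmsibrahim786-web/mercatica-project | application.py | extract_section_by_number
-- ===== SOURCE A (Python) =====
-- def extract_section_by_number(text, number):
--     lines = text.split('\n')
--     capture = False
--     result = []
--
--     for line in lines:
--         if line.strip().startswith(f"{number}."):
--             capture = True
--             result.append(line.split(":", 1)[-1].strip())
--         elif capture:
--             if any(line.strip().startswith(f"{i}.") for i in range(1, 10)):
--                 break
--             result.append(line.strip())
--
--     return ' '.join(result).strip() if result else "Not found"
-- ===== SOURCE B (Python) =====
-- def extract_section_by_number(text, number):
--     lines = text.split('\n')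
--     header = f"{number}."
--     idxs = [i for i, l in enumerate(lines) if l.strip().startswith(header)]
--     if not idxs:
--         return "Not found"
--     start = idxs[0]
--     end = next((i for i in range(start + 1, len(lines))
--                 if not lines[i].strip().startswith(header)
--                 and any(lines[i].strip().startswith(f"{k}.") for k in range(1, 10))),
--                len(lines))
--     pieces = [l.split(":", 1)[-1].strip() if l.strip().startswith(header) else l.strip()
--               for l in lines[start:end]]
--     return ' '.join(pieces).strip()
-- ===== Notes on version B (the rewrite author's own statement) =====
-- stated objective: alternative
-- what changed: Replaces A's stateful capture-flag accumulator pass by an index-based staged computation: collect all header-line indices, compute the section's end boundary by searching indices after the first header, then map a pure per-line transform over the slice lines[start:end].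
import Mathlib
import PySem

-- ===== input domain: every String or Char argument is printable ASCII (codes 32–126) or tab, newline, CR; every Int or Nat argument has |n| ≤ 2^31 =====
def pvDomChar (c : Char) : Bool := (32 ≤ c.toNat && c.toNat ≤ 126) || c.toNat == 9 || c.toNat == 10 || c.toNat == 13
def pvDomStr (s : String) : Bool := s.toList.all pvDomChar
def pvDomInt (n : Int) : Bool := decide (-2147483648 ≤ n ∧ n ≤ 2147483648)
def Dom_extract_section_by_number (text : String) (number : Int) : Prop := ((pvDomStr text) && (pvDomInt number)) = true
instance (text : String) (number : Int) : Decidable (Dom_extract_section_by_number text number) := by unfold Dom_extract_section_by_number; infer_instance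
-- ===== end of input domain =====

-- B replaces A's stateful capture-flag pass by an index-based staged computation (same cost); return values proved equal.

-- shared primitive helpers (used verbatim by both Pythons)
-- f"{number}."
def pvHeader (number : Int) : String := String.ofList (PySem.Int.toChars number ++ ['.'])
-- line.split(":", 1)[-1].strip()
def pvColonTail (line : String) : String :=
  match PySem.Str.splitMax? line ":" 1 with
  | some parts => PySem.Str.strip ((PySem.List.pyGet? parts (-1)).getD "")
  | none => ""
-- any(s.startswith(f"{i}.") for i in range(1, 10))
def pvIsBreak (s : String) : Bool :=
  (PySem.List.pyRange 1 10 1).any (fun i => PySem.Str.startswith s (pvHeader i))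

-- ===== PORT A =====
-- A's single for-loop with the capture flag and the growing result list
def pvLoopA (header : String) (lines : List String) (capture : Bool) (result : List String) : List String :=
  match lines with
  | [] => result
  | l :: rest =>
    if PySem.Str.startswith (PySem.Str.strip l) header then
      pvLoopA header rest true (result ++ [pvColonTail l])
    else if capture then
      if pvIsBreak (PySem.Str.strip l) then result
      else pvLoopA header rest capture (result ++ [PySem.Str.strip l])
    else pvLoopA header rest capture result

def extract_section_by_number (text : String) (number : Int) : String :=
  let lines := (PySem.Str.split? text "\n").getD []
  let result := pvLoopA (pvHeader number) lines false []
  if result.isEmpty then "Not found" else PySem.Str.strip (PySem.Str.join " " result)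

-- ===== PORT B =====
-- [i for i, l in enumerate(lines) if l.strip().startswith(header)], carrying the running index
def pvHeaderIdxs (header : String) : List String → Nat → List Nat
  | [], _ => []
  | l :: rest, i =>
    if PySem.Str.startswith (PySem.Str.strip l) header then i :: pvHeaderIdxs header rest (i+1)
    else pvHeaderIdxs header rest (i+1)

-- next((i for i in range(start+1, len(lines)) if <boundary cond>), len(lines)):
-- scan of the indices after `n`, returning the first boundary index (or the length)
def pvFindEnd (header : String) : List String → Nat → Nat
  | [], n => n
  | l :: rest, n =>
    let s := PySem.Str.strip l
    if !PySem.Str.startswith s header && pvIsBreak s then n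
    else pvFindEnd header rest (n+1)

-- the per-line transform of B's final comprehension
def pvPiece (header : String) (l : String) : String :=
  if PySem.Str.startswith (PySem.Str.strip l) header then pvColonTail l else PySem.Str.strip l

def extract_section_by_number_alt (text : String) (number : Int) : String :=
  let lines := (PySem.Str.split? text "\n").getD []
  let header := pvHeader number
  match pvHeaderIdxs header lines 0 with
  | [] => "Not found"
  | start :: _ =>
    let e := pvFindEnd header (lines.drop (start+1)) (start+1)
    let pieces := ((lines.drop start).take (e - start)).map (pvPiece header)
    PySem.Str.strip (PySem.Str.join " " pieces)

-- ===== PRECONDITION & SPEC =====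
def Spec_extract_section_by_number (text : String) (number : Int) (out : String) : Prop := out = extract_section_by_number_alt text number
instance (text : String) (number : Int) (out : String) : Decidable (Spec_extract_section_by_number text number out) := by unfold Spec_extract_section_by_number; infer_instance

-- ===== CLAIM (what is proved, stated in full; the proofs are below) =====
def Claim_equal_extract_section_by_number : Prop := ∀ (text : String) (number : Int), Dom_extract_section_by_number text number → Spec_extract_section_by_number text number (extract_section_by_number text number)

-- ===== LEMMAS AND PROOFS =====

-- pvFindEnd only adds its start offset
lemma findEnd_offset (header : String) : ∀ (lines : List String) (n : Nat),
    pvFindEnd header lines n = n + pvFindEnd header lines 0 := by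
  intro lines
  induction lines with
  | nil => intro n; simp [pvFindEnd]
  | cons l rest ih =>
    intro n
    simp only [pvFindEnd]
    split_ifs
    · rfl
    · rw [ih (n+1), ih 1]; omega

lemma findEnd_one (header : String) (lines : List String) :
    pvFindEnd header lines 1 = pvFindEnd header lines 0 + 1 := by
  rw [findEnd_offset]; omega

-- once capture is set, A's loop collects exactly the mapped prefix up to the boundary
lemma loopA_true_eq (header : String) : ∀ (lines : List String) (acc : List String),
    pvLoopA header lines true acc =
      acc ++ ((lines.take (pvFindEnd header lines 0)).map (pvPiece header)) := by
  intro lines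
  induction lines with
  | nil => intro acc; simp [pvLoopA, pvFindEnd]
  | cons l rest ih =>
    intro acc
    by_cases hsw : PySem.Str.startswith (PySem.Str.strip l) header = true
    · have hswN := hsw
      simp at hswN
      have hp : pvPiece header l = pvColonTail l := by simp [pvPiece, hswN]
      simp [pvLoopA, pvFindEnd, hswN, ih, findEnd_one, hp, List.append_assoc]
    · simp only [Bool.not_eq_true] at hsw
      have hswN := hsw
      simp at hswN
      by_cases hbr : pvIsBreak (PySem.Str.strip l) = true
      · have hbrN := hbr
        simp at hbrN
        simp [pvLoopA, pvFindEnd, hswN, hbrN]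
      · simp only [Bool.not_eq_true] at hbr
        have hbrN := hbr
        simp at hbrN
        have hp : pvPiece header l = PySem.Str.strip l := by simp [pvPiece, hswN]
        simp [pvLoopA, pvFindEnd, hswN, hbrN, ih, findEnd_one, hp, List.append_assoc]

-- the pre-capture search of A characterised through B's index list
lemma loopA_false_idx (header : String) : ∀ (lines : List String) (n : Nat),
    (pvHeaderIdxs header lines n = [] → pvLoopA header lines false [] = []) ∧
    (∀ s t, pvHeaderIdxs header lines n = s :: t →
      n ≤ s ∧ ∃ l rest, lines.drop (s - n) = l :: rest ∧
        PySem.Str.startswith (PySem.Str.strip l) header = true ∧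
        pvLoopA header lines false [] =
          pvColonTail l :: ((rest.take (pvFindEnd header rest 0)).map (pvPiece header))) := by
  intro lines
  induction lines with
  | nil =>
    intro n
    exact ⟨fun _ => rfl, fun s t h => by simp [pvHeaderIdxs] at h⟩
  | cons l rest ih =>
    intro n
    by_cases hsw : PySem.Str.startswith (PySem.Str.strip l) header = true
    · constructor
      · intro h
        simp only [pvHeaderIdxs, if_pos hsw] at h
        exact absurd h (by simp)
      · intro s t h
        simp only [pvHeaderIdxs, if_pos hsw] at h
        injection h with h1 h2
        subst h1
        refine ⟨le_refl n, l, rest, by simp, hsw, ?_⟩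
        simp only [pvLoopA, if_pos hsw]
        rw [loopA_true_eq]
        simp
    · simp only [Bool.not_eq_true] at hsw
      have hswN := hsw
      simp at hswN
      have hstep : pvHeaderIdxs header (l :: rest) n = pvHeaderIdxs header rest (n+1) := by
        simp [pvHeaderIdxs, hswN]
      have hlp : pvLoopA header (l :: rest) false [] = pvLoopA header rest false [] := by
        simp [pvLoopA, hswN]
      constructor
      · intro h
        rw [hlp]
        exact (ih (n+1)).1 (hstep ▸ h)
      · intro s t h
        rw [hstep] at h
        obtain ⟨hns, l', rest', hdrop, hsw', hval⟩ := (ih (n+1)).2 s t h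
        refine ⟨by omega, l', rest', ?_, hsw', by rw [hlp]; exact hval⟩
        have hsn : s - n = (s - (n+1)) + 1 := by omega
        rw [hsn]
        simpa using hdrop

-- the two whole-function bodies agree once lines and header are abstracted
lemma core_eq (lines : List String) (header : String) :
    (if (pvLoopA header lines false []).isEmpty then "Not found"
     else PySem.Str.strip (PySem.Str.join " " (pvLoopA header lines false []))) =
    (match pvHeaderIdxs header lines 0 with
     | [] => "Not found"
     | start :: _ =>
       PySem.Str.strip (PySem.Str.join " "
         (((lines.drop start).take
             (pvFindEnd header (lines.drop (start+1)) (start+1) - start)).map (pvPiece header)))) := by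
  cases hidx : pvHeaderIdxs header lines 0 with
  | nil =>
    have h0 := (loopA_false_idx header lines 0).1 hidx
    rw [h0]
    rfl
  | cons s t =>
    obtain ⟨-, l, rest, hdrop, hsw, hval⟩ := (loopA_false_idx header lines 0).2 s t hidx
    rw [Nat.sub_zero] at hdrop
    have hdrop1 : lines.drop (s+1) = rest := by
      have h := congrArg (List.drop 1) hdrop
      rw [List.drop_drop] at h
      simpa [Nat.add_comm] using h
    have he : pvFindEnd header (lines.drop (s+1)) (s+1) - s = pvFindEnd header rest 0 + 1 := by
      rw [hdrop1, findEnd_offset]; omega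
    have hswN := hsw
    simp at hswN
    have hp : pvPiece header l = pvColonTail l := by simp [pvPiece, hswN]
    simp [hval, he, hdrop, hp, List.take_succ_cons]

-- ===== VERDICT (by name: the statement is the Claim_ definition above) =====
theorem extract_section_by_number_spec : Claim_equal_extract_section_by_number := by
  intro text number _
  unfold Spec_extract_section_by_number extract_section_by_number extract_section_by_number_alt
  exact core_eq ((PySem.Str.split? text "\n").getD []) (pvHeader number)
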